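-- pv_equiv track=rewrite | github.com/eth-infinitism/verkle-gas-estimator | estimation.py | calculate_chunks_read_verkle_effect
-- ===== SOURCE A (Python) =====
-- WITNESS_BRANCH_COST = 1900
--
-- WITNESS_CHUNK_COST = 200
--
-- def calculate_chunks_read_verkle_effect(contract_chunks):
--     # NOTE: subtree 0 initialization cost will be tracked here
--     branches_access_events = {}
--
--     code_cost = 0
--     for [contract_chunk, _] in contract_chunks.items():
--         code_cost += WITNESS_CHUNK_COST
--         branch_id = contract_chunk // 256
--         if branch_id not in branches_access_events:
--             branches_access_events[branch_id] = True
--             code_cost += WITNESS_BRANCH_COST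
--     return code_cost
-- ===== SOURCE B (Python) =====
-- WITNESS_BRANCH_COST = 1900
--
-- WITNESS_CHUNK_COST = 200
--
-- def calculate_chunks_read_verkle_effect(contract_chunks):
--     # Sort-then-scan: sort the branch ids, count distinct ones by comparing
--     # adjacent entries (no hash/dict membership structure at all).
--     branch_ids = sorted(k // 256 for k in contract_chunks)
--     boundaries = sum(1 for a, b in zip(branch_ids, branch_ids[1:]) if a != b)
--     distinct = boundaries + 1 if branch_ids else 0
--     return WITNESS_CHUNK_COST * len(branch_ids) + WITNESS_BRANCH_COST * distinct
-- ===== Notes on version B (the rewrite author's own statement) =====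
-- stated objective: alternative
-- what changed: Replaces the accumulator loop with its guard dict by sort-then-scan: sort the branch ids, count distinct ids as 1 + the number of adjacent unequal pairs, and combine with a closed-form 200*n + 1900*distinct; no membership structure or running-cost loop remains.
import Mathlib
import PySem

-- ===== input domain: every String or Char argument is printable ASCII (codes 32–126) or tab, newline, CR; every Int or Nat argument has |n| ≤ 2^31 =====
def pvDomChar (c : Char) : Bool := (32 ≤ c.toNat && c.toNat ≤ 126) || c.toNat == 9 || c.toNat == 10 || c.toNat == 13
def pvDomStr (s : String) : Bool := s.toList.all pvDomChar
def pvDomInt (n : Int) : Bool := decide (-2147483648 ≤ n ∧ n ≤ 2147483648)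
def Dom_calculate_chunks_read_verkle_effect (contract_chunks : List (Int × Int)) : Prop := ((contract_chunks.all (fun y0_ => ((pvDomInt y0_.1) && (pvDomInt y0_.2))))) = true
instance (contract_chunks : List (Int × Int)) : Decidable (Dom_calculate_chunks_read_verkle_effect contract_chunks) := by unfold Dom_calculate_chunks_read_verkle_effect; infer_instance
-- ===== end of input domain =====

-- B replaces A's accumulator loop with its guard dict by sort-then-scan: sort the branch ids and count distinct ids via adjacent comparisons (alternative algorithm, no membership structure).


-- ===== PORT A =====
def calculate_chunks_read_verkle_effect (contract_chunks : List (Int × Int)) : Int :=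
  -- branches_access_events = {}; code_cost = 0; for [contract_chunk, _] in contract_chunks.items(): …
  (contract_chunks.foldl
    (fun (st : PySem.Dict Int Bool × Int) p =>
      let code_cost := st.2 + 200
      let branch_id := PySem.Int.floordiv p.1 256
      if st.1.contains branch_id = false then
        (st.1.insert branch_id true, code_cost + 1900)
      else
        (st.1, code_cost))
    (PySem.Dict.empty, 0)).2

-- ===== PORT B =====
def calculate_chunks_read_verkle_effect_alt (contract_chunks : List (Int × Int)) : Int :=
  -- branch_ids = sorted(k // 256 for k in contract_chunks)
  let branch_ids :=
    PySem.List.sorted (contract_chunks.map (fun p => PySem.Int.floordiv p.1 256)) (fun x => x) false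
  -- boundaries = sum(1 for a, b in zip(branch_ids, branch_ids[1:]) if a != b)
  let boundaries : Int :=
    ((branch_ids.zip (PySem.List.slice branch_ids (some 1) none)).foldl
      (fun acc ab => if ab.1 ≠ ab.2 then acc + 1 else acc) 0)
  -- distinct = boundaries + 1 if branch_ids else 0
  let distinct : Int := if branch_ids ≠ [] then boundaries + 1 else 0
  200 * (branch_ids.length : Int) + 1900 * distinct

-- ===== PRECONDITION & SPEC =====
def Spec_calculate_chunks_read_verkle_effect (contract_chunks : List (Int × Int)) (out : Int) : Prop := out = calculate_chunks_read_verkle_effect_alt contract_chunks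
instance (contract_chunks : List (Int × Int)) (out : Int) : Decidable (Spec_calculate_chunks_read_verkle_effect contract_chunks out) := by unfold Spec_calculate_chunks_read_verkle_effect; infer_instance

-- ===== CLAIM =====
def Claim_equal_calculate_chunks_read_verkle_effect : Prop := ∀ (contract_chunks : List (Int × Int)), Dom_calculate_chunks_read_verkle_effect contract_chunks → Spec_calculate_chunks_read_verkle_effect contract_chunks (calculate_chunks_read_verkle_effect contract_chunks)

-- ===== LEMMAS AND PROOFS =====

-- Loop invariant for A's fold: final cost + 1900·(#keys already seen) =
-- start cost + 200·(#items) + 1900·(#keys after absorbing all branch ids).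
theorem pv_loopA (l : List (Int × Int)) (d : PySem.Dict Int Bool) (c : Int) :
    (l.foldl
      (fun (st : PySem.Dict Int Bool × Int) p =>
        let code_cost := st.2 + 200
        let branch_id := PySem.Int.floordiv p.1 256
        if st.1.contains branch_id = false then
          (st.1.insert branch_id true, code_cost + 1900)
        else
          (st.1, code_cost))
      (d, c)).2 + 1900 * (d.keys.length : Int)
    = c + 200 * l.length
      + 1900 * ((PySem.Set.update d.keys (l.map (fun p => PySem.Int.floordiv p.1 256))).length : Int) := by
  induction l generalizing d c with
  | nil => simp [PySem.Set.update]
  | cons p t ih =>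
    simp only [List.foldl_cons, List.map_cons, List.length_cons]
    set b := PySem.Int.floordiv p.1 256 with hb
    have hupd : ∀ (s : PySem.Set Int) (xs : List Int),
        PySem.Set.update s (b :: xs) = PySem.Set.update (PySem.Set.add s b) xs := by
      intro s xs; simp [PySem.Set.update]
    by_cases h : d.contains b = false
    · simp only [h, if_true]
      have hk : (d.insert b true).keys = d.keys ++ [b] :=
        PySem.Dict.keys_insert_of_not_contains d true h
      have hadd : PySem.Set.add d.keys b = d.keys ++ [b] := by
        have hm : b ∉ d.keys := fun hm => by
          simp [(PySem.Dict.contains_iff_mem_keys d b).mpr hm] at h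
        simp [PySem.Set.add, PySem.Set.contains, hm]
      have := ih (d.insert b true) (c + 200 + 1900)
      rw [hk] at this
      rw [hupd, hadd]
      simp only [List.length_append, List.length_cons, List.length_nil] at this
      push_cast at this ⊢
      omega
    · simp only [h]
      have hadd : PySem.Set.add d.keys b = d.keys := by
        have hm : b ∈ d.keys :=
          (PySem.Dict.contains_iff_mem_keys d b).mp (by simpa using h)
        simp [PySem.Set.add, PySem.Set.contains, hm]
      rw [hupd, hadd]
      have := ih d (c + 200)
      push_cast at this ⊢
      omega

-- The foldl in B is an accumulator-shifted count.
theorem pv_foldB_acc (l : List (Int × Int)) (acc : Int) :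
    l.foldl (fun acc ab => if ab.1 ≠ ab.2 then acc + 1 else acc) acc
      = acc + l.foldl (fun acc ab => if ab.1 ≠ ab.2 then acc + 1 else acc) 0 := by
  induction l generalizing acc with
  | nil => simp
  | cons ab t ih =>
    simp only [List.foldl_cons]
    rw [ih, ih (if ab.1 ≠ ab.2 then (0:Int) + 1 else 0)]
    split_ifs <;> ring

-- A nodup list's length is the card of its toFinset; Set.ofList xs has xs's members and is nodup.
theorem pv_len_ofList_card (xs : List Int) :
    ((PySem.Set.ofList xs).length : Int) = (xs.toFinset.card : Int) := by
  have h1 : (PySem.Set.ofList xs).length = (PySem.Set.ofList xs).toFinset.card :=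
    (List.toFinset_card_of_nodup (PySem.Set.nodup_ofList xs)).symm
  have h2 : (PySem.Set.ofList xs).toFinset = xs.toFinset := by
    ext y; simp [List.mem_toFinset, PySem.Set.mem_ofList]
  rw [h1, h2]

-- On a ≤-sorted list, 1 + #(adjacent unequal pairs) counts the distinct elements.
theorem pv_scan_sorted (s : List Int) (hs : s.Pairwise (· ≤ ·)) :
    ((s.zip (s.drop 1)).foldl (fun acc ab => if ab.1 ≠ ab.2 then acc + 1 else acc) (0:Int))
      + (if s ≠ [] then 1 else 0) = (s.toFinset.card : Int) := by
  induction s with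
  | nil => simp
  | cons a t ih =>
    cases t with
    | nil => simp
    | cons b t2 =>
      have hab : a ≤ b := (List.pairwise_cons.mp hs).1 b (by simp)
      have ht : (b :: t2).Pairwise (· ≤ ·) := (List.pairwise_cons.mp hs).2
      have hbt : ∀ x ∈ t2, b ≤ x := fun x hx => (List.pairwise_cons.mp ht).1 x hx
      have hmem : a ∈ b :: t2 → a = b := by
        intro h
        rcases List.mem_cons.mp h with h' | h'
        · exact h'
        · exact le_antisymm hab (hbt a h')
      have ih' := ih ht
      simp only [List.drop_one, List.tail_cons, List.zip_cons_cons, List.foldl_cons,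
        ne_eq, reduceCtorEq, not_false_eq_true, if_true] at ih' ⊢
      rw [pv_foldB_acc]
      set F := ((b :: t2).zip t2).foldl (fun acc ab => if ¬ab.1 = ab.2 then acc + 1 else acc) (0:Int) with hF
      by_cases hab' : a = b
      · subst hab'
        have hins : (a :: a :: t2).toFinset = (a :: t2).toFinset := by simp
        rw [hins, ← ih']
        simp
      · have hnm : a ∉ insert b t2.toFinset := by
          simp only [Finset.mem_insert, List.mem_toFinset]
          rintro (h | h)
          · exact hab' h
          · exact hab' (hmem (List.mem_cons_of_mem b h))
        have hcard : (a :: b :: t2).toFinset.card = (b :: t2).toFinset.card + 1 := by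
          simp only [List.toFinset_cons]
          rw [Finset.card_insert_of_notMem hnm]
        rw [hcard]
        push_cast
        rw [← ih']
        simp [hab']
        ring

-- ===== VERDICT =====
theorem calculate_chunks_read_verkle_effect_spec : Claim_equal_calculate_chunks_read_verkle_effect := by
  intro l _
  show _ = _
  unfold calculate_chunks_read_verkle_effect calculate_chunks_read_verkle_effect_alt
  -- A's side: 200·n + 1900·|set of branch ids|
  have hA := pv_loopA l PySem.Dict.empty 0
  simp only [PySem.Dict.keys_empty] at hA
  simp only [List.length_nil, Int.natCast_zero, mul_zero, add_zero, zero_add] at hA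
  set m := l.map (fun p => PySem.Int.floordiv p.1 256) with hm
  have hAset : PySem.Set.update ([] : PySem.Set Int) m = PySem.Set.ofList m := by
    simp [PySem.Set.update, PySem.Set.ofList_eq_foldl]
  rw [hAset] at hA
  rw [hA, pv_len_ofList_card]
  -- B's side
  set s := PySem.List.sorted m (fun x => x) false with hs
  have hperm : s.Perm m := PySem.List.sorted_perm m (fun x => x) false
  have hfin : s.toFinset = m.toFinset := by
    ext y; simp [List.mem_toFinset, hperm.mem_iff]
  have hpw : s.Pairwise (· ≤ ·) := by
    have := PySem.List.sorted_pairwise m (fun x => x)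
    simpa [hs] using this
  have hscan := pv_scan_sorted s hpw
  rw [hfin] at hscan
  have hslice : PySem.List.slice s (some 1) none = s.drop 1 := by
    have := PySem.List.slice_from_natCast (a := 1) (xs := s)
    simpa using this
  have hlen : s.length = l.length := by
    rw [PySem.List.length_sorted m (fun x => x) false, hm, List.length_map]
  simp only [hslice, hlen, ne_eq]
  simp only [ne_eq] at hscan
  by_cases hnil : s = []
  · have hm0 : m = [] := (hnil ▸ hperm : ([] : List Int).Perm m).nil_eq.symm
    have hl0 : l = [] := List.map_eq_nil_iff.mp (hm.symm.trans hm0)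
    simp [hl0, hm0, hnil]
  · simp only [hnil, not_false_eq_true, if_true] at hscan ⊢
    omega
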